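-- pv_equiv track=rewrite | github.com/ICHEC/QNLP | modules/py/pkgs/QNLP/encoding/simple.py | _gen_encoding_vals
-- ===== SOURCE A (Python) =====
-- def _gen_encoding_vals(num_items):
--     ""
--     num_shifts = num_items//2
--     vals = [0]*num_items
--     for i in range(1, num_shifts+1):
--         vals[i] = vals[i-1] + (0b1 << (i-1))
--     for i in range(1, num_shifts):
--         vals[i + num_shifts ] = vals[i + num_shifts -1] - (0b1 << (i-1))
--     val_dict = { k:v for (k,v) in zip(range(len(vals)), vals)}
--     return val_dict
-- ===== SOURCE B (Python) =====
-- def _gen_encoding_vals(num_items):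
--     # closed-form per index: no running sums, no second pass, no zip
--     s = num_items // 2
--     def val(i):
--         if 1 <= i <= s:
--             return (1 << i) - 1
--         if s < i <= 2 * s - 1:
--             return (1 << s) - (1 << (i - s))
--         return 0
--     return {i: val(i) for i in range(num_items)}
-- ===== Notes on version B (the rewrite author's own statement) =====
-- stated objective: simpler
-- what changed: Replaces the two recurrence loops over a mutable list plus the zip-based dict build by a single dict comprehension that computes each value directly from a closed-form power-of-two formula per index.
import Mathlib
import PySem

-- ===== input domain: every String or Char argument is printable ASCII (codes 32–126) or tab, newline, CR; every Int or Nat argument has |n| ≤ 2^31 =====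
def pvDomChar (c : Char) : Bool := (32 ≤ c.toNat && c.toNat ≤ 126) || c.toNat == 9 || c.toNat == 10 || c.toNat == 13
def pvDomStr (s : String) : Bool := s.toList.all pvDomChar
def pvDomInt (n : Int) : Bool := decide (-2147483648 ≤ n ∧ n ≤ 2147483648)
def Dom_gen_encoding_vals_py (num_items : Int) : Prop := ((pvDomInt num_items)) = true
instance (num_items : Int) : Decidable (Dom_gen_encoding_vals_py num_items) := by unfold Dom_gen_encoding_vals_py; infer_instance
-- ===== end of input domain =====

-- B replaces the two running-sum loops and the zip by one map with a closed-form value per index (objective: simpler).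

-- ===== PORT A =====
-- literal transliteration of _gen_encoding_vals: [0]*n, two in-place index-assignment
-- loops (pySetD/pyGetD; all indices are in range on every reachable iteration), then
-- dict(zip(range(len(vals)), vals)) — the keys are distinct and increasing, so the
-- insertion-order association list is exactly the zip.
def gen_encoding_vals_py (num_items : Int) : List (Int × Int) :=
  let num_shifts := PySem.Int.floordiv num_items 2
  let vals : List Int := List.replicate num_items.toNat 0
  let vals := (PySem.List.pyRange 1 (num_shifts + 1) 1).foldl
    (fun v i => PySem.List.pySetD v i (PySem.List.pyGetD v (i - 1) 0 + 2 ^ (i - 1).toNat)) vals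
  let vals := (PySem.List.pyRange 1 num_shifts 1).foldl
    (fun v i => PySem.List.pySetD v (i + num_shifts)
      (PySem.List.pyGetD v (i + num_shifts - 1) 0 - 2 ^ (i - 1).toNat)) vals
  (PySem.List.pyRange 0 (vals.length : Int) 1).zip vals

-- ===== PORT B =====
-- helper = Source B's inner 'val(i)'; 1 << k is written 2 ^ k
def gen_encoding_vals_py_alt_val (s i : Int) : Int :=
  if 1 ≤ i ∧ i ≤ s then 2 ^ i.toNat - 1
  else if s < i ∧ i ≤ 2 * s - 1 then 2 ^ s.toNat - 2 ^ (i - s).toNat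
  else 0

def gen_encoding_vals_py_alt (num_items : Int) : List (Int × Int) :=
  let s := PySem.Int.floordiv num_items 2
  (List.range num_items.toNat).map (fun (j : Nat) => ((j : Int), gen_encoding_vals_py_alt_val s (j : Int)))

-- ===== PRECONDITION & SPEC =====
def Spec_gen_encoding_vals_py (num_items : Int) (out : List (Int × Int)) : Prop := out = gen_encoding_vals_py_alt num_items
instance (num_items : Int) (out : List (Int × Int)) : Decidable (Spec_gen_encoding_vals_py num_items out) := by unfold Spec_gen_encoding_vals_py; infer_instance

-- ===== CLAIM (what is proved, stated in full; the proofs are below) =====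
def Claim_equal_gen_encoding_vals_py : Prop := ∀ (num_items : Int), Dom_gen_encoding_vals_py num_items → Spec_gen_encoding_vals_py num_items (gen_encoding_vals_py num_items)

-- ===== LEMMAS AND PROOFS =====

-- value of the list after loop 1 ran i = 1 .. k
def pvF1 (k j : Nat) : Int := if 1 ≤ j ∧ j ≤ k then 2 ^ j - 1 else 0

-- value after loop 2 additionally ran i = 1 .. k (with num_shifts = s)
def pvF2 (s k j : Nat) : Int :=
  if 1 ≤ j ∧ j ≤ s then 2 ^ j - 1
  else if s < j ∧ j ≤ s + k then 2 ^ s - 2 ^ (j - s) else 0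

theorem pv_set_map_range (L m : Nat) (a : Int) (f g : Nat → Int)
    (h1 : m < L → a = g m) (h2 : ∀ j, j ≠ m → f j = g j) :
    ((List.range L).map f).set m a = (List.range L).map g := by
  apply List.ext_getElem
  · simp
  · intro i hi hi'
    simp only [List.getElem_set] at *
    simp only [List.getElem_map, List.getElem_range]
    split
    · next h => subst h; exact (h1 (by simpa using hi)).symm ▸ rfl
    · next h => exact h2 i (Ne.symm h)

theorem pv_loop1_char (L k : Nat) (hk : k < L) :
    (PySem.List.pyRange 1 ((k : Int) + 1) 1).foldl
      (fun v i => PySem.List.pySetD v i (PySem.List.pyGetD v (i - 1) 0 + 2 ^ (i - 1).toNat))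
      (List.replicate L (0 : Int))
    = (List.range L).map (pvF1 k) := by
  induction k with
  | zero =>
    rw [PySem.List.pyRange_one_eq_nil (by norm_num)]
    simp only [List.foldl_nil]
    apply List.ext_getElem
    · simp
    · intro i hi hi'
      simp only [List.getElem_replicate, List.getElem_map, List.getElem_range]
      unfold pvF1
      rw [if_neg (by omega)]
  | succ k ih =>
    have hstep : PySem.List.pyRange 1 ((k : Int) + 1 + 1) 1
        = PySem.List.pyRange 1 ((k : Int) + 1) 1 ++ [(k : Int) + 1] := by
      have := PySem.List.pyRange_one_succ_right (a := 1) (b := (k : Int) + 1) (by omega)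
      simpa using this
    have hk' : k < L := by omega
    push_cast
    rw [hstep, List.foldl_append, ih hk']
    simp only [List.foldl_cons, List.foldl_nil]
    have hidx : ((k : Int) + 1 - 1) = (k : Int) := by ring
    rw [hidx]
    have hget : PySem.List.pyGetD ((List.range L).map (pvF1 k)) (k : Int) 0 = pvF1 k k := by
      rw [PySem.List.pyGetD_natCast]
      rw [List.getD_eq_getElem?_getD]
      simp [hk']
    rw [hget]
    have hcast : ((k : Int) + 1) = ((k + 1 : Nat) : Int) := by push_cast; ring
    rw [hcast, PySem.List.pySetD_natCast]
    have htn : ((k : Int).toNat) = k := Int.toNat_natCast k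
    rw [htn]
    apply pv_set_map_range
    · intro _
      unfold pvF1
      rcases Nat.eq_zero_or_pos k with h0 | h0
      · subst h0; norm_num
      · rw [if_pos (by omega), if_pos (by omega)]
        have : (2 : Int) ^ (k + 1) = 2 ^ k * 2 := by ring
        rw [this]; ring
    · intro j hj
      unfold pvF1
      by_cases h1 : 1 ≤ j ∧ j ≤ k
      · rw [if_pos h1, if_pos (by omega)]
      · rw [if_neg h1, if_neg (by omega)]

theorem pv_loop2_char (L s k : Nat) (hL : 2 * s ≤ L) (hk : k = 0 ∨ k + 1 ≤ s) :
    (PySem.List.pyRange 1 ((k : Int) + 1) 1).foldl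
      (fun v i => PySem.List.pySetD v (i + (s : Int))
        (PySem.List.pyGetD v (i + (s : Int) - 1) 0 - 2 ^ (i - 1).toNat))
      ((List.range L).map (pvF1 s))
    = (List.range L).map (pvF2 s k) := by
  induction k with
  | zero =>
    rw [PySem.List.pyRange_one_eq_nil (by norm_num)]
    simp only [List.foldl_nil]
    apply List.ext_getElem
    · simp
    · intro i hi hi'
      simp only [List.getElem_map, List.getElem_range]
      unfold pvF1 pvF2
      by_cases h1 : 1 ≤ i ∧ i ≤ s
      · rw [if_pos h1, if_pos h1]
      · rw [if_neg h1, if_neg h1, if_neg (by omega)]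
  | succ k ih =>
    have hks : k + 2 ≤ s := by omega
    have hstep : PySem.List.pyRange 1 ((k : Int) + 1 + 1) 1
        = PySem.List.pyRange 1 ((k : Int) + 1) 1 ++ [(k : Int) + 1] := by
      have := PySem.List.pyRange_one_succ_right (a := 1) (b := (k : Int) + 1) (by omega)
      simpa using this
    push_cast
    rw [hstep, List.foldl_append, ih (by omega)]
    simp only [List.foldl_cons, List.foldl_nil]
    have hidx : ((k : Int) + 1 + (s : Int) - 1) = ((s + k : Nat) : Int) := by push_cast; ring
    rw [hidx]
    have hsk : s + k < L := by omega
    have hget : PySem.List.pyGetD ((List.range L).map (pvF2 s k)) ((s + k : Nat) : Int) 0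
        = pvF2 s k (s + k) := by
      rw [PySem.List.pyGetD_natCast, List.getD_eq_getElem?_getD]
      simp [hsk]
    rw [hget]
    have hval : pvF2 s k (s + k) - 2 ^ (((k : Int) + 1 - 1).toNat) = 2 ^ s - 2 ^ (k + 1) := by
      have h1 : (((k : Int) + 1 - 1).toNat) = k := by
        simp
      rw [h1]
      unfold pvF2
      rcases Nat.eq_zero_or_pos k with h0 | h0
      · subst h0
        rw [if_pos (by omega)]
        push_cast
        ring
      · rw [if_neg (by omega), if_pos (by omega)]
        have h2 : s + k - s = k := by omega
        rw [h2]
        have : (2 : Int) ^ (k + 1) = 2 ^ k * 2 := by ring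
        rw [this]; ring
    rw [hval]
    have hcast : ((k : Int) + 1 + (s : Int)) = ((s + k + 1 : Nat) : Int) := by push_cast; ring
    rw [hcast, PySem.List.pySetD_natCast]
    apply pv_set_map_range
    · intro _
      unfold pvF2
      rw [if_neg (by omega), if_pos (by omega)]
      have : s + k + 1 - s = k + 1 := by omega
      rw [this]
    · intro j hj
      unfold pvF2
      by_cases h1 : 1 ≤ j ∧ j ≤ s
      · rw [if_pos h1, if_pos h1]
      · by_cases h2 : s < j ∧ j ≤ s + k
        · rw [if_neg h1, if_pos h2, if_neg h1, if_pos (by omega)]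
        · rw [if_neg h1, if_neg h2, if_neg h1, if_neg (by omega)]

-- B's per-index value equals the loop characterisation
theorem pv_val_eq (s j : Nat) :
    gen_encoding_vals_py_alt_val (s : Int) (j : Int) = pvF2 s (s - 1) j := by
  have hts : ((s : Int)).toNat = s := Int.toNat_natCast s
  have htj : ((j : Int)).toNat = j := Int.toNat_natCast j
  have htd : (((j : Int) - (s : Int))).toNat = j - s := by omega
  unfold gen_encoding_vals_py_alt_val pvF2
  split_ifs <;> (try simp only [htj, hts, htd]) <;> first | rfl | omega

theorem pv_zip_eq (L : Nat) (f : Nat → Int) :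
    (PySem.List.pyRange 0 (L : Int) 1).zip ((List.range L).map f)
    = (List.range L).map (fun (j : Nat) => ((j : Int), f j)) := by
  rw [PySem.List.pyRange_zero_natCast]
  exact List.zip_map'

-- ===== VERDICT (by name: the statement is the Claim_ definition above) =====
theorem gen_encoding_vals_py_spec : Claim_equal_gen_encoding_vals_py := by
  intro n _
  unfold Spec_gen_encoding_vals_py
  simp only [gen_encoding_vals_py, gen_encoding_vals_py_alt]
  by_cases hn : n ≤ 0
  · have h0 : n.toNat = 0 := by omega
    have hs : PySem.Int.floordiv n 2 ≤ 0 := by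
      rw [PySem.Int.floordiv_eq_ediv_of_pos (by norm_num)]; omega
    rw [h0, PySem.List.pyRange_one_eq_nil (by omega : PySem.Int.floordiv n 2 + 1 ≤ 1),
      PySem.List.pyRange_one_eq_nil (by omega : PySem.Int.floordiv n 2 ≤ 1)]
    simp
  · have hn0 : 0 ≤ n := by omega
    have hLn : ((n.toNat : Nat) : Int) = n := Int.toNat_of_nonneg hn0
    have hs : PySem.Int.floordiv n 2 = ((n.toNat / 2 : Nat) : Int) := by
      rw [← hLn]; exact_mod_cast PySem.Int.floordiv_natCast n.toNat 2
    rw [hs]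
    have hsL : n.toNat / 2 < n.toNat := by omega
    rw [pv_loop1_char n.toNat (n.toNat / 2) hsL]
    have hrng : PySem.List.pyRange 1 ((n.toNat / 2 : Nat) : Int) 1
        = PySem.List.pyRange 1 (((n.toNat / 2 - 1 : Nat) : Int) + 1) 1 := by
      rcases Nat.eq_zero_or_pos (n.toNat / 2) with h | h
      · rw [h, PySem.List.pyRange_one_eq_nil (by norm_num),
          PySem.List.pyRange_one_eq_nil (by norm_num)]
      · congr 1; push_cast [Nat.sub_add_cancel h]; ring_nf; omega
    rw [hrng, pv_loop2_char n.toNat (n.toNat / 2) (n.toNat / 2 - 1) (by omega) (by omega)]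
    simp only [List.length_map, List.length_range]
    rw [pv_zip_eq n.toNat (pvF2 (n.toNat / 2) (n.toNat / 2 - 1))]
    apply List.map_congr_left
    intro j _
    simp only [pv_val_eq]
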